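-- pv_equiv track=rewrite | github.com/bcaitech1/p4-fr-sorry-math-but-love-you | utils/data_utils.py | encode_truth
-- ===== SOURCE A (Python) =====
-- def encode_truth(truth: str, token_to_id: dict):
--     """입력한 수식 문자열을 인코딩하는 함수"""
--     truth_tokens = truth.split()
--     for token in truth_tokens:
--         if token not in token_to_id:
--             raise Exception("Truth contains unknown token")
--     truth_tokens = [token_to_id[x] for x in truth_tokens]
--     if "" in truth_tokens:
--         truth_tokens.remove("")
--     return truth_tokens
-- ===== SOURCE B (Python) =====
-- def encode_truth(truth: str, token_to_id: dict):
--     """Single pass with an accumulator: look each token up as we go (EAFP),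
--     raising immediately on the first unknown token."""
--     ids = []
--     for token in truth.split():
--         try:
--             ids.append(token_to_id[token])
--         except KeyError:
--             raise Exception("Truth contains unknown token")
--     return ids
-- ===== Notes on version B (the rewrite author's own statement) =====
-- stated objective: simpler
-- what changed: Replaced A's staged validate-all loop + separate map comprehension (and its dead '"" in list' removal) with a single accumulator pass that looks up and appends each token, failing on the first unknown token instead of pre-checking membership.
import Mathlib
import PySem

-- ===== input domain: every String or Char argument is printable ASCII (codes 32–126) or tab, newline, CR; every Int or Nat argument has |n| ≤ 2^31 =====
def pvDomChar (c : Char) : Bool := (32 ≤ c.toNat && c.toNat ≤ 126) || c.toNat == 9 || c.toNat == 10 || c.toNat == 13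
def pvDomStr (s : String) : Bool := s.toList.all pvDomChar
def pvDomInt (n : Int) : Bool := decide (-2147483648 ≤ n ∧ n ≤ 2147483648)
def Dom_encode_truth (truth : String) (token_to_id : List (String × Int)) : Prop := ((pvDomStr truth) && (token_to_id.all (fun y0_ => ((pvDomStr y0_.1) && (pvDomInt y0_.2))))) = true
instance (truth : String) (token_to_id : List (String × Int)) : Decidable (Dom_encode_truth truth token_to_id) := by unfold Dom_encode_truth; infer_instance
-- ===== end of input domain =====

-- B replaces A's staged validate-all loop + map comprehension (and A's dead `"" in list` removal) with one accumulator pass that looks up each token as it goes; objective: simpler.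


-- ===== PORT A =====
-- `token_to_id[x]` on the association list (first match), as Option: none = KeyError
def pvLookA (token_to_id : List (String × Int)) (t : String) : Option Int :=
  (token_to_id.find? (fun p => p.1 == t)).map (·.2)

def encode_truth (truth : String) (token_to_id : List (String × Int)) : List Int :=
  let truth_tokens := PySem.Str.split₀ truth
  -- for token in truth_tokens: if token not in token_to_id: raise  (the raise is excluded by Pre_)
  if truth_tokens.all (fun token => (pvLookA token_to_id token).isSome) then
    -- [token_to_id[x] for x in truth_tokens]; the `if "" in truth_tokens` branch is dead (an Int list never contains ""), omitted
    truth_tokens.map (fun x => (pvLookA token_to_id x).getD 0)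
  else []  -- Exception("Truth contains unknown token")

-- ===== PORT B =====
-- B's per-token lookup: the plain structural assoc-list recursion (first match)
def pvAssocB : List (String × Int) → String → Option Int
  | [], _ => none
  | (k, v) :: rest, t => if k == t then some v else pvAssocB rest t

-- B's single pass: `ids` accumulator built front-first (cons then reverse); none = the re-raised Exception
def pvLoopB (m : List (String × Int)) : List String → List Int → Option (List Int)
  | [], ids => some ids.reverse
  | t :: ts, ids =>
    match pvAssocB m t with
    | some v => pvLoopB m ts (v :: ids)
    | none => none

def encode_truth_alt (truth : String) (token_to_id : List (String × Int)) : List Int :=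
  (pvLoopB token_to_id (PySem.Str.split₀ truth) []).getD []
  -- the `none` (raised Exception) case is excluded by Pre_

-- ===== PRECONDITION & SPEC =====
-- A (and B) raise Exception("Truth contains unknown token") when some whitespace-split token is not a key.
def Pre_encode_truth (truth : String) (token_to_id : List (String × Int)) : Prop :=
  ∀ t ∈ PySem.Str.split₀ truth, (token_to_id.find? (fun p => p.1 == t)).isSome

instance (truth : String) (token_to_id : List (String × Int)) : Decidable (Pre_encode_truth truth token_to_id) := by
  unfold Pre_encode_truth; infer_instance

def pvWitness_encode_truth : String × (List (String × Int)) := ("a b a", [("a", 1), ("b", 2)])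

def Spec_encode_truth (truth : String) (token_to_id : List (String × Int)) (out : List Int) : Prop := out = encode_truth_alt truth token_to_id
instance (truth : String) (token_to_id : List (String × Int)) (out : List Int) : Decidable (Spec_encode_truth truth token_to_id out) := by unfold Spec_encode_truth; infer_instance

-- ===== CLAIM =====
def Claim_equal_encode_truth : Prop := ∀ (truth : String) (token_to_id : List (String × Int)), Dom_encode_truth truth token_to_id → Pre_encode_truth truth token_to_id → Spec_encode_truth truth token_to_id (encode_truth truth token_to_id)

-- ===== LEMMAS AND PROOFS =====
-- B's structural lookup agrees with A's find?-based lookup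
theorem pvAssocB_eq_look (m : List (String × Int)) (t : String) :
    pvAssocB m t = pvLookA m t := by
  induction m with
  | nil => rfl
  | cons p rest ih =>
    obtain ⟨k, v⟩ := p
    by_cases h : (k == t) = true <;> simp [pvAssocB, pvLookA, List.find?_cons, h] <;>
      simpa [pvLookA] using ih

-- when every token is known, the accumulator loop returns acc.reverse ++ the mapped ids
theorem pvLoopB_eq_map (m : List (String × Int)) :
    ∀ (xs : List String) (acc : List Int), (∀ t ∈ xs, (pvLookA m t).isSome) →
      pvLoopB m xs acc = some (acc.reverse ++ xs.map (fun x => (pvLookA m x).getD 0)) := by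
  intro xs
  induction xs with
  | nil => intro acc _; simp [pvLoopB]
  | cons a tl ih =>
    intro acc h
    have ha : (pvLookA m a).isSome := h a (List.mem_cons_self)
    obtain ⟨v, hv⟩ := Option.isSome_iff_exists.mp ha
    simp [pvLoopB, pvAssocB_eq_look, hv,
      ih (v :: acc) (fun t ht => h t (List.mem_cons_of_mem _ ht))]

-- ===== VERDICT =====
theorem encode_truth_spec : Claim_equal_encode_truth := by
  intro truth m _ hpre
  unfold Spec_encode_truth encode_truth encode_truth_alt
  have hpre' : ∀ t ∈ PySem.Str.split₀ truth, (pvLookA m t).isSome := by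
    intro t ht; simpa [pvLookA] using hpre t ht
  have hall : (PySem.Str.split₀ truth).all (fun token => (pvLookA m token).isSome) = true := by
    simp only [List.all_eq_true]; exact hpre'
  simp [hall, pvLoopB_eq_map m _ [] hpre']
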